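-- pv_equiv track=rewrite | github.com/NumaGout/My-projects | morpion.py | meilleur_choix
-- ===== SOURCE A (Python) =====
-- dimension = 3
--
-- def Nb_de_droite(G,ij):
--     """ calcule combien de possibilitées un pion possède """
--     i,j = ij
--     Nb = 2
--     if i == j:
--         Nb += 1
--     if i+j == dimension+1:
--         Nb += 1
--     return Nb
--
-- def meilleur_choix(G,l):
--     """ Renvoie le meilleur choix du pion a placer, privilégie les diago """
--     VB,VN,VV=G
--     p = [(0,0)]
--     for i in range(len(l)):
--         if l[i][0] > p[0][0]:
--             p = []
--             p.append(l[i])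
--         elif l[i][0] == p[0][0]:
--             p.append(l[i])
--
--     meilleur = ((0,0),0)
--     for k in p:
--         c = Nb_de_droite(G,VV[k[1]])
--         if c > meilleur[1]:
--             meilleur = k,c
--
--     return meilleur[0]
-- ===== SOURCE B (Python) =====
-- dimension = 3
--
-- def Nb_de_droite(G, ij):
--     """ calcule combien de possibilitees un pion possede """
--     i, j = ij
--     Nb = 2
--     if i == j:
--         Nb += 1
--     if i + j == dimension + 1:
--         Nb += 1
--     return Nb
--
-- def meilleur_choix(G, l):
--     """ Same choice, without building the candidate list: compute the max first
--     coordinate (floored at 0), then scan l once keeping the first strict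
--     improvement of Nb_de_droite among entries reaching that max. """
--     VB, VN, VV = G
--     m = 0
--     for x in l:
--         if x[0] > m:
--             m = x[0]
--     best = (0, 0)
--     bestc = Nb_de_droite(G, VV[0]) if m == 0 else 0  # seed (0,0) competes only when m == 0
--     for x in l:
--         if x[0] == m:
--             c = Nb_de_droite(G, VV[x[1]])
--             if c > bestc:
--                 best = x
--                 bestc = c
--     return best
-- ===== Notes on version B (the rewrite author's own statement) =====
-- stated objective: alternative
-- what changed: B replaces A's candidate-list construction (reset/append loop building p, then a scan of p) by computing the max first coordinate directly and a single filtered scan of l keeping scalar (best, bestc) accumulators, with the (0,0) seed handled as an initial value when the max is 0.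
import Mathlib
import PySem

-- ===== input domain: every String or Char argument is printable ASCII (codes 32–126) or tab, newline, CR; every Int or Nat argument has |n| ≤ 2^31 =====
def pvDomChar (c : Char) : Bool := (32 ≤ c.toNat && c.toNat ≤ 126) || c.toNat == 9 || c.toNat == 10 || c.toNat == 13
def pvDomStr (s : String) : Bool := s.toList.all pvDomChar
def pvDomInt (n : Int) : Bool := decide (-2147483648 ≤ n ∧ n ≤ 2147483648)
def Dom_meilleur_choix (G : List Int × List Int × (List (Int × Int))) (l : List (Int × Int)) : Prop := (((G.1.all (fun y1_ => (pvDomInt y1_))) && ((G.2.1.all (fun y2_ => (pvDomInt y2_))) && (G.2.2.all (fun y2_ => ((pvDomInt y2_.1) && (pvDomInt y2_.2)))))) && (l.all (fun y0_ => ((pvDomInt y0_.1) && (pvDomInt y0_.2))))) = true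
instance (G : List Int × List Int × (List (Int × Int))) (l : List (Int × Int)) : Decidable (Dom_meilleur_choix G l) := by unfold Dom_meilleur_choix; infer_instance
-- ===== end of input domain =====

-- B replaces A's reset/append candidate-list construction by a direct running-max and one
-- filtered scan with scalar accumulators (alternative decomposition, same O(n) cost).

-- ===== PORT A =====
def dimension : Int := 3

-- Nb_de_droite, used by both Pythons
def Nb_de_droite (G : List Int × List Int × (List (Int × Int))) (ij : Int × Int) : Int :=
  let Nb : Int := 2
  let Nb := if ij.1 = ij.2 then Nb + 1 else Nb
  let Nb := if ij.1 + ij.2 = dimension + 1 then Nb + 1 else Nb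
  Nb

-- body of A's first loop (p is never empty; the [] case is unreachable)
def pvStep1 (p : List (Int × Int)) (x : Int × Int) : List (Int × Int) :=
  match p with
  | [] => p
  | h :: _ => if x.1 > h.1 then [x] else if x.1 = h.1 then p ++ [x] else p

-- body of A's second loop; the pyGet? default is never used under Pre_
def pvStep2 (G : List Int × List Int × (List (Int × Int))) (m : (Int × Int) × Int) (k : Int × Int) : (Int × Int) × Int :=
  let c := Nb_de_droite G ((PySem.List.pyGet? G.2.2 k.2).getD (0, 0))
  if c > m.2 then (k, c) else m

def meilleur_choix (G : List Int × List Int × (List (Int × Int))) (l : List (Int × Int)) : Int × Int :=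
  let p := l.foldl pvStep1 [((0 : Int), (0 : Int))]
  let meilleur := p.foldl (pvStep2 G) (((0 : Int), (0 : Int)), (0 : Int))
  meilleur.1

-- ===== PORT B =====
-- body of B's running-max loop
def pvMaxStep (a : Int) (x : Int × Int) : Int := if x.1 > a then x.1 else a

def meilleur_choix_alt (G : List Int × List Int × (List (Int × Int))) (l : List (Int × Int)) : Int × Int :=
  let VV := G.2.2
  let m := l.foldl pvMaxStep 0
  let bestc : Int := if m = 0 then Nb_de_droite G ((PySem.List.pyGet? VV 0).getD (0, 0)) else 0
  let s := l.foldl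
    (fun (s : (Int × Int) × Int) x =>
      if x.1 = m then
        let c := Nb_de_droite G ((PySem.List.pyGet? VV x.2).getD (0, 0))
        if c > s.2 then (x, c) else s
      else s)
    (((0 : Int), (0 : Int)), bestc)
  s.1

-- ===== PRECONDITION & SPEC =====
-- Pre_ excludes exactly the inputs where Python A raises IndexError: some entry of the
-- max-first group (including the (0,0) seed when the max is 0) indexes VV out of range.
def Pre_meilleur_choix (G : List Int × List Int × (List (Int × Int))) (l : List (Int × Int)) : Prop :=
  let VV := G.2.2
  let m := l.foldl (fun a x => max a x.1) 0
  (m = 0 → VV ≠ []) ∧ ∀ x ∈ l, x.1 = m → (-(VV.length : Int) ≤ x.2 ∧ x.2 < (VV.length : Int))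
instance (G : List Int × List Int × (List (Int × Int))) (l : List (Int × Int)) : Decidable (Pre_meilleur_choix G l) := by unfold Pre_meilleur_choix; infer_instance

def pvWitness_meilleur_choix : (List Int × List Int × (List (Int × Int))) × (List (Int × Int)) :=
  (([], [], [(1, 1)]), [(1, 0), (0, 3)])

def Spec_meilleur_choix (G : List Int × List Int × (List (Int × Int))) (l : List (Int × Int)) (out : Int × Int) : Prop := out = meilleur_choix_alt G l
instance (G : List Int × List Int × (List (Int × Int))) (l : List (Int × Int)) (out : Int × Int) : Decidable (Spec_meilleur_choix G l out) := by unfold Spec_meilleur_choix; infer_instance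

-- ===== CLAIM (what is proved, stated in full; the proofs are below) =====
def Claim_equal_meilleur_choix : Prop := ∀ (G : List Int × List Int × (List (Int × Int))) (l : List (Int × Int)), Dom_meilleur_choix G l → Pre_meilleur_choix G l → Spec_meilleur_choix G l (meilleur_choix G l)

-- ===== LEMMAS AND PROOFS =====

theorem pvLe_foldl_max (l : List (Int × Int)) (a : Int) : a ≤ l.foldl pvMaxStep a := by
  induction l generalizing a with
  | nil => simp
  | cons x xs ih =>
    refine le_trans ?_ (ih (pvMaxStep a x))
    simp only [pvMaxStep]; split <;> omega

-- A's first loop builds: the start block (kept iff nothing beats its head) followed by all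
-- entries whose first coordinate equals the running maximum.
theorem pvStepA_char (l : List (Int × Int)) (h : Int × Int) (t : List (Int × Int)) :
    List.foldl pvStep1 (h :: t) l =
      (if l.foldl pvMaxStep h.1 = h.1 then h :: t else []) ++
        l.filter (fun x => x.1 = l.foldl pvMaxStep h.1) := by
  induction l generalizing h t with
  | nil => simp
  | cons x xs ih =>
    by_cases h1 : x.1 > h.1
    · have hm : pvMaxStep h.1 x = x.1 := by simp [pvMaxStep, h1]
      have hM : x.1 ≤ xs.foldl pvMaxStep x.1 := pvLe_foldl_max xs x.1
      have e1 : pvStep1 (h :: t) x = [x] := by simp [pvStep1, h1]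
      rw [List.foldl_cons, e1, ih x []]
      rw [List.foldl_cons, hm]
      have hne : ¬ (xs.foldl pvMaxStep x.1 = h.1) := by omega
      rw [List.filter_cons]
      by_cases hx : xs.foldl pvMaxStep x.1 = x.1
      · rw [if_pos hx, if_neg hne,
          if_pos (show decide (x.1 = xs.foldl pvMaxStep x.1) = true from decide_eq_true hx.symm)]
        rfl
      · have hx' : ¬ (x.1 = xs.foldl pvMaxStep x.1) := by omega
        rw [if_neg hx, if_neg hne,
          if_neg (show ¬ decide (x.1 = xs.foldl pvMaxStep x.1) = true from by simpa using hx')]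
    · have hm : pvMaxStep h.1 x = h.1 := by simp [pvMaxStep, h1]
      by_cases h2 : x.1 = h.1
      · have e1 : pvStep1 (h :: t) x = (h :: t) ++ [x] := by
          simp [pvStep1, h2]
        rw [List.foldl_cons, e1]
        have : (h :: t) ++ [x] = h :: (t ++ [x]) := by simp
        rw [this, ih h (t ++ [x])]
        rw [List.foldl_cons, hm, List.filter_cons]
        by_cases hM : xs.foldl pvMaxStep h.1 = h.1
        · simp [hM, h2]
        · have hM' : ¬ (h.1 = xs.foldl pvMaxStep h.1) := fun e => hM e.symm
          simp [hM, h2, hM']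
      · have e1 : pvStep1 (h :: t) x = h :: t := by
          simp [pvStep1, h1, h2]
        rw [List.foldl_cons, e1, ih h t, List.foldl_cons, hm, List.filter_cons]
        have hx : ¬ (x.1 = xs.foldl pvMaxStep h.1) := by
          have := pvLe_foldl_max xs h.1; omega
        simp [hx]

-- B's guarded loop is the fold of A's second-loop body over the filtered list.
theorem pvFilter_fold (G : List Int × List Int × (List (Int × Int))) (m : Int)
    (l : List (Int × Int)) (s : (Int × Int) × Int) :
    l.foldl
      (fun (s : (Int × Int) × Int) x =>
        if x.1 = m then
          let c := Nb_de_droite G ((PySem.List.pyGet? G.2.2 x.2).getD (0, 0))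
          if c > s.2 then (x, c) else s
        else s) s
      = (l.filter (fun x => x.1 = m)).foldl (pvStep2 G) s := by
  induction l generalizing s with
  | nil => rfl
  | cons x xs ih =>
    rw [List.foldl_cons, List.filter_cons]
    by_cases hx : x.1 = m
    · simp only [hx, List.foldl_cons, ih, pvStep2, decide_true, if_true]
    · simp [hx, ih]

theorem pvNb_pos (G : List Int × List Int × (List (Int × Int))) (ij : Int × Int) :
    0 < Nb_de_droite G ij := by
  simp only [Nb_de_droite]
  split <;> split <;> omega

theorem pvMain_eq (G : List Int × List Int × (List (Int × Int))) (l : List (Int × Int)) :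
    meilleur_choix G l = meilleur_choix_alt G l := by
  show (List.foldl (pvStep2 G) (((0 : Int), (0 : Int)), (0 : Int)) (l.foldl pvStep1 [((0 : Int), (0 : Int))])).1
      = (List.foldl
          (fun (s : (Int × Int) × Int) x =>
            if x.1 = l.foldl pvMaxStep 0 then
              let c := Nb_de_droite G ((PySem.List.pyGet? G.2.2 x.2).getD (0, 0))
              if c > s.2 then (x, c) else s
            else s)
          (((0 : Int), (0 : Int)),
            if l.foldl pvMaxStep 0 = 0 then Nb_de_droite G ((PySem.List.pyGet? G.2.2 (0 : Int)).getD (0, 0)) else 0)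
          l).1
  rw [pvStepA_char l (0, 0) [], pvFilter_fold]
  by_cases hM : l.foldl pvMaxStep 0 = (0 : Int)
  · rw [if_pos hM, if_pos hM]
    rw [List.singleton_append, List.foldl_cons]
    have hc := pvNb_pos G ((PySem.List.pyGet? G.2.2 (0 : Int)).getD (0, 0))
    have e2 : pvStep2 G (((0 : Int), (0 : Int)), (0 : Int)) ((0 : Int), (0 : Int))
        = (((0 : Int), (0 : Int)), Nb_de_droite G ((PySem.List.pyGet? G.2.2 (0 : Int)).getD (0, 0))) := by
      simp only [pvStep2]; rw [if_pos (by exact hc)]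
    rw [e2]
  · rw [if_neg hM, if_neg hM, List.nil_append]

-- ===== VERDICT (by name: the statement is the Claim_ definition above) =====
theorem meilleur_choix_spec : Claim_equal_meilleur_choix := by
  intro G l _ _
  unfold Spec_meilleur_choix
  exact pvMain_eq G l
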